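-- pv_equiv track=rewrite | github.com/clsrfish/leetcode | src/leetcode/s239.py | findMaxValPosition
-- ===== SOURCE A (Python) =====
-- from typing import List
--
-- def findMaxValPosition(nums: List[int], start: int, end: int) -> int:
--
--     maxVal = nums[start]
--     maxValPos = start
--     for i in range(start + 1, end + 1):
--         if nums[i] >= maxVal:
--             maxVal = nums[i]
--             maxValPos = i
--     return maxValPos
-- ===== SOURCE B (Python) =====
-- def findMaxValPosition(nums, start, end):
--     vals = [nums[i] for i in range(start, end + 1)]
--     maxVal = max(vals) if vals else nums[start]
--     for i in reversed(range(start + 1, end + 1)):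
--         if nums[i] == maxVal:
--             return i
--     return start
-- ===== Notes on version B (the rewrite author's own statement) =====
-- stated objective: alternative
-- what changed: B replaces A's single running (maxVal, maxValPos) accumulator loop by two separate passes: first compute the maximum value of nums[start..end] with max(), then scan the range backwards returning the first index holding that value (= A's last-occurrence tie-break), falling back to start.
import Mathlib
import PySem

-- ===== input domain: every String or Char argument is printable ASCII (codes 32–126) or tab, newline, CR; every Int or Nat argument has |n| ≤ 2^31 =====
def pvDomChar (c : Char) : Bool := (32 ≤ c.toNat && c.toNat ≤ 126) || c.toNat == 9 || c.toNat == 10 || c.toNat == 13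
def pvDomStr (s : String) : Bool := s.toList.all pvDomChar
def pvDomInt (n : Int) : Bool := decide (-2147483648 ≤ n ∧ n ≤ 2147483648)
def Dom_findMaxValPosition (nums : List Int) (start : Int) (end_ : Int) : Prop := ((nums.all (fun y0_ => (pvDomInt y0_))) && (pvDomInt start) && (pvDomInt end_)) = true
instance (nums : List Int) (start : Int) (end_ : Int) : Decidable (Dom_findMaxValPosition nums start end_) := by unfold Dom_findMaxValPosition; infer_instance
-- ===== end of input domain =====

-- B computes the subrange maximum in one pass and then finds its last position by a backward scan,
-- instead of A's single loop carrying a (maxVal, maxValPos) accumulator; same O(n) cost.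


-- ===== PORT A =====
-- literal port of A: one loop over range(start+1, end+1) updating (maxVal, maxValPos) on nums[i] >= maxVal
def findMaxValPosition (nums : List Int) (start : Int) (end_ : Int) : Int :=
  ((PySem.List.pyRange (start + 1) (end_ + 1) 1).foldl
    (fun (s : Int × Int) i =>
      if PySem.List.pyGetD nums i 0 ≥ s.1 then (PySem.List.pyGetD nums i 0, i) else s)
    (PySem.List.pyGetD nums start 0, start)).2

-- ===== PORT B =====
-- literal port of B: max of nums[start..end] first, then a backward scan for its position
def findMaxValPosition_alt (nums : List Int) (start : Int) (end_ : Int) : Int :=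
  let vals := (PySem.List.pyRange start (end_ + 1) 1).map (fun i => PySem.List.pyGetD nums i 0)
  let maxVal := if vals ≠ [] then (PySem.List.max? vals (fun y => y)).getD 0
                else PySem.List.pyGetD nums start 0
  match ((PySem.List.pyRange (start + 1) (end_ + 1) 1).reverse.find?
          (fun i => PySem.List.pyGetD nums i 0 == maxVal)) with
  | some i => i
  | none => start

-- ===== PRECONDITION & SPEC =====
-- Pre_ excludes exactly the inputs where Python A raises IndexError: start must be a valid
-- (possibly negative) index, and when the loop runs (start < end_) its last index end_ must be in range.
def Pre_findMaxValPosition (nums : List Int) (start : Int) (end_ : Int) : Prop :=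
  -(nums.length : Int) ≤ start ∧ start < (nums.length : Int) ∧ (start < end_ → end_ < (nums.length : Int))
instance (nums : List Int) (start : Int) (end_ : Int) : Decidable (Pre_findMaxValPosition nums start end_) := by unfold Pre_findMaxValPosition; infer_instance
def pvWitness_findMaxValPosition : List Int × Int × Int := ([1, 3, 2], 0, 2)

def Spec_findMaxValPosition (nums : List Int) (start : Int) (end_ : Int) (out : Int) : Prop := out = findMaxValPosition_alt nums start end_
instance (nums : List Int) (start : Int) (end_ : Int) (out : Int) : Decidable (Spec_findMaxValPosition nums start end_ out) := by unfold Spec_findMaxValPosition; infer_instance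

-- ===== CLAIM (what is proved, stated in full; the proofs are below) =====
def Claim_equal_findMaxValPosition : Prop := ∀ (nums : List Int) (start : Int) (end_ : Int), Dom_findMaxValPosition nums start end_ → Pre_findMaxValPosition nums start end_ → Spec_findMaxValPosition nums start end_ (findMaxValPosition nums start end_)

-- ===== LEMMAS AND PROOFS =====

-- the running max of a list is either the seed or an element
lemma foldl_max_mem (c : Int) (vs : List Int) : vs.foldl max c = c ∨ vs.foldl max c ∈ vs := by
  induction vs generalizing c with
  | nil => simp
  | cons v t ih =>
    simp only [List.foldl_cons, List.mem_cons]
    rcases ih (max c v) with h | h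
    · rcases max_choice c v with h' | h' <;> rw [h'] at h ⊢
      · exact Or.inl h
      · exact Or.inr (Or.inl h)
    · exact Or.inr (Or.inr h)

-- A's accumulator loop computes (running max, last position attaining the final max; else the seed position)
lemma foldA_spec (g : Int → Int) (L : List Int) (m p : Int) :
    L.foldl (fun (s : Int × Int) i => if g i ≥ s.1 then (g i, i) else s) (m, p)
    = ((L.map g).foldl max m,
       (L.reverse.find? (fun i => g i == (L.map g).foldl max m)).getD p) := by
  induction L generalizing m p with
  | nil => simp
  | cons i rest ih =>
    have hm : (if g i ≥ m then (g i, i) else (m, p)).1 = max m (g i) := by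
      split <;> simp <;> omega
    have hM : ((i :: rest).map g).foldl max m = (rest.map g).foldl max (max m (g i)) := by
      simp [List.foldl]
    by_cases hgi : g i ≥ m
    · simp only [List.foldl_cons, if_pos hgi]
      rw [ih (g i) i, hM]
      have hmx : max m (g i) = g i := by omega
      rw [hmx]
      rcases hfind : rest.reverse.find? (fun j => g j == (rest.map g).foldl max (g i)) with _ | j
      · -- no element of rest attains the max, so the max is the seed g i
        have hnone : ∀ j ∈ rest, ¬ (g j = (rest.map g).foldl max (g i)) := by
          intro j hj
          have := List.find?_eq_none.mp hfind j (by simpa using hj)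
          simpa using this
        have hMi : (rest.map g).foldl max (g i) = g i := by
          rcases foldl_max_mem (g i) (rest.map g) with h | h
          · exact h
          · rcases List.mem_map.mp h with ⟨j, hj, hje⟩
            exact absurd hje (hnone j hj)
        rw [hMi] at hfind ⊢
        simp [List.find?_append, hfind]
      · simp [List.find?_append, hfind]
    · simp only [List.foldl_cons, if_neg hgi]
      rw [ih m p, hM]
      have hmx : max m (g i) = m := by omega
      rw [hmx]
      rcases hfind : rest.reverse.find? (fun j => g j == (rest.map g).foldl max m) with _ | j
      · have hnone : ∀ j ∈ rest, ¬ (g j = (rest.map g).foldl max m) := by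
          intro j hj
          have := List.find?_eq_none.mp hfind j (by simpa using hj)
          simpa using this
        have hMm : (rest.map g).foldl max m = m := by
          rcases foldl_max_mem m (rest.map g) with h | h
          · exact h
          · rcases List.mem_map.mp h with ⟨j, hj, hje⟩
            exact absurd hje (hnone j hj)
        have hne : ¬ (g i = m) := by omega
        rw [hMm] at hfind ⊢
        simp [List.find?_append, hfind, hne]
      · simp [List.find?_append, hfind]

-- ===== VERDICT (by name: the statement is the Claim_ definition above) =====
theorem findMaxValPosition_spec : Claim_equal_findMaxValPosition := by
  intro nums start end_ _ _
  unfold Spec_findMaxValPosition findMaxValPosition findMaxValPosition_alt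
  set g : Int → Int := fun i => PySem.List.pyGetD nums i 0 with hg
  by_cases h : start < end_ + 1
  · -- the outer range is nonempty: it is start :: (inner range)
    rw [PySem.List.pyRange_one_cons h]
    rw [foldA_spec g (PySem.List.pyRange (start + 1) (end_ + 1) 1) (g start) start]
    simp only [List.map_cons, ne_eq, reduceCtorEq, not_false_eq_true, if_pos,
      PySem.List.max?_id_cons, Option.getD_some]
    rcases hfind : (PySem.List.pyRange (start + 1) (end_ + 1) 1).reverse.find?
        (fun i => g i == ((PySem.List.pyRange (start + 1) (end_ + 1) 1).map g).foldl max (g start)) with _ | j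
    · simp
    · simp
  · -- empty range: both return start
    have h1 : end_ + 1 ≤ start := by omega
    have h2 : end_ + 1 ≤ start + 1 := by omega
    rw [PySem.List.pyRange_one_eq_nil h1, PySem.List.pyRange_one_eq_nil h2]
    simp
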